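-- pv_equiv track=rewrite | github.com/sdharii/TIP102 | Unit 1/Week1Session1.py | split_haycorns
-- ===== SOURCE A (Python) =====
-- def split_haycorns(quantity):
--     result = []
--     count = 1
--     for _ in range(quantity):
--         if quantity % count == 0:
--             result.append(count)
--         count += 1
--     return result
--
-- quantity = 1
-- ===== SOURCE B (Python) =====
-- def split_haycorns(quantity):
--     small = []
--     large = []
--     d = 1
--     while d * d <= quantity:
--         if quantity % d == 0:
--             small.append(d)
--             if d * d != quantity:
--                 large.append(quantity // d)
--         d += 1
--     return small + large[::-1]
-- ===== Notes on version B (the rewrite author's own statement) =====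
-- stated objective: faster
-- what changed: B does trial division only up to sqrt(quantity), collecting each divisor d together with its cofactor quantity//d, and concatenates the two halves instead of scanning all counts 1..quantity.
import Mathlib
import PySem

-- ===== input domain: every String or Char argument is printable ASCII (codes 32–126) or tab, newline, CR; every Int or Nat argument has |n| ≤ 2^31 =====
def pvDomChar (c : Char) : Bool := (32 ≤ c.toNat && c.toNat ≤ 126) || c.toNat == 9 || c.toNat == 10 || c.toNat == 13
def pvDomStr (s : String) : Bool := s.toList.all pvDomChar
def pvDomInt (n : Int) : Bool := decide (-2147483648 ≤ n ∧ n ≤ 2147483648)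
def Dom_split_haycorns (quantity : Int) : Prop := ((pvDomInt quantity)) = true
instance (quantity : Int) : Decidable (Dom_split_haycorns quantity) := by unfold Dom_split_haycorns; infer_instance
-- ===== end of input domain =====

-- B replaces A's scan over all counts 1..quantity by trial division up to √quantity,
-- collecting each small divisor with its cofactor quantity//d (objective: faster).

-- ===== PORT A =====
-- for _ in range(quantity): state (result, count); count += 1 each step
def split_haycorns (quantity : Int) : List Int :=
  ((PySem.List.pyRange 0 quantity 1).foldl
    (fun (st : List Int × Int) _ =>
      (if PySem.Int.mod quantity st.2 = 0 then st.1 ++ [st.2] else st.1, st.2 + 1))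
    ([], 1)).1

-- ===== PORT B =====
-- termination helper for the while loop: d*d ≤ q forces d ≤ q
theorem pvSqLe_le (d q : Int) (h : d * d ≤ q) : d ≤ q := by
  by_cases h0 : d ≤ 0
  · nlinarith
  · nlinarith

-- while d * d <= quantity: append d to small, quantity//d to large
def altLoop (quantity d : Int) (small large : List Int) : List Int × List Int :=
  if h : d * d ≤ quantity then
    if PySem.Int.mod quantity d = 0 then
      altLoop quantity (d + 1) (small ++ [d])
        (if d * d ≠ quantity then large ++ [PySem.Int.floordiv quantity d] else large)
    else
      altLoop quantity (d + 1) small large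
  else
    (small, large)
termination_by (quantity + 1 - d).toNat
decreasing_by
  all_goals
    have hle : d ≤ quantity := pvSqLe_le d quantity h
    omega

-- return small + large[::-1]  (large[::-1] is the reverse of large)
def split_haycorns_alt (quantity : Int) : List Int :=
  let p := altLoop quantity 1 [] []
  p.1 ++ p.2.reverse

-- ===== PRECONDITION & SPEC =====
def Spec_split_haycorns (quantity : Int) (out : List Int) : Prop := out = split_haycorns_alt quantity
instance (quantity : Int) (out : List Int) : Decidable (Spec_split_haycorns quantity out) := by unfold Spec_split_haycorns; infer_instance

-- ===== CLAIM (what is proved, stated in full; the proofs are below) =====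
def Claim_equal_split_haycorns : Prop := ∀ (quantity : Int), Dom_split_haycorns quantity → Spec_split_haycorns quantity (split_haycorns quantity)

-- ===== LEMMAS AND PROOFS =====

-- the small/large sequences produced from trial divisor d upward, without accumulators
def Fdiv (q d : Int) : List Int :=
  if h : d * d ≤ q then
    if PySem.Int.mod q d = 0 then d :: Fdiv q (d + 1) else Fdiv q (d + 1)
  else []
termination_by (q + 1 - d).toNat
decreasing_by
  all_goals
    have hle : d ≤ q := pvSqLe_le d q h
    omega

def Gdiv (q d : Int) : List Int :=
  if h : d * d ≤ q then
    if PySem.Int.mod q d = 0 ∧ d * d ≠ q then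
      PySem.Int.floordiv q d :: Gdiv q (d + 1)
    else Gdiv q (d + 1)
  else []
termination_by (q + 1 - d).toNat
decreasing_by
  all_goals
    have hle : d ≤ q := pvSqLe_le d q h
    omega

theorem altLoop_eq (q d : Int) (small large : List Int) :
    altLoop q d small large = (small ++ Fdiv q d, large ++ Gdiv q d) := by
  induction d, small, large using altLoop.induct q with
  | case1 d small large h hmod IH =>
    rw [altLoop]
    simp only [dif_pos h, if_pos hmod]
    by_cases hne : d * d ≠ q
    · simp only [dif_pos hne, if_pos hne] at IH ⊢
      rw [IH]
      conv_rhs => rw [Fdiv, Gdiv]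
      simp only [dif_pos h, if_pos hmod, if_pos (And.intro hmod hne)]
      simp [List.append_assoc]
    · simp only [dif_neg hne, if_neg hne] at IH ⊢
      rw [IH]
      conv_rhs => rw [Fdiv, Gdiv]
      have hcc : ¬ (PySem.Int.mod q d = 0 ∧ d * d ≠ q) := fun hc => hne hc.2
      simp only [dif_pos h, if_pos hmod, if_neg hcc]
      simp [List.append_assoc]
  | case2 d small large h hmod IH =>
    rw [altLoop]
    simp only [dif_pos h, if_neg hmod]
    rw [IH]
    conv_rhs => rw [Fdiv, Gdiv]
    have hcc : ¬ (PySem.Int.mod q d = 0 ∧ d * d ≠ q) := fun hc => hmod hc.1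
    simp only [dif_pos h, if_neg hmod, if_neg hcc]
  | case3 d small large h =>
    rw [altLoop, Fdiv, Gdiv]
    simp [dif_neg h]

theorem mem_Fdiv (q d : Int) :
    1 ≤ d → ∀ x, (x ∈ Fdiv q d ↔ d ≤ x ∧ x * x ≤ q ∧ x ∣ q) := by
  induction d using Fdiv.induct q with
  | case1 d h hmod IH =>
    intro hd x
    have IH' := IH (by omega) x
    rw [Fdiv]
    simp only [dif_pos h, if_pos hmod, List.mem_cons, IH']
    have hdvd : d ∣ q := (PySem.Int.mod_eq_zero_iff_dvd q d).mp hmod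
    constructor
    · rintro (rfl | ⟨h1, h2, h3⟩)
      · exact ⟨le_refl _, h, hdvd⟩
      · exact ⟨by omega, h2, h3⟩
    · rintro ⟨h1, h2, h3⟩
      rcases eq_or_lt_of_le h1 with rfl | hlt
      · exact Or.inl rfl
      · exact Or.inr ⟨by omega, h2, h3⟩
  | case2 d h hmod IH =>
    intro hd x
    have IH' := IH (by omega) x
    rw [Fdiv]
    simp only [dif_pos h, if_neg hmod, IH']
    constructor
    · rintro ⟨h1, h2, h3⟩; exact ⟨by omega, h2, h3⟩
    · rintro ⟨h1, h2, h3⟩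
      refine ⟨?_, h2, h3⟩
      rcases eq_or_lt_of_le h1 with rfl | hlt
      · exact absurd ((PySem.Int.mod_eq_zero_iff_dvd _ _).mpr h3) hmod
      · omega
  | case3 d h =>
    intro hd x
    rw [Fdiv]
    simp only [dif_neg h, List.not_mem_nil, false_iff]
    rintro ⟨h1, h2, h3⟩
    have : d * d ≤ x * x := mul_le_mul h1 h1 (by omega) (by omega)
    omega

theorem mem_Gdiv (q d : Int) :
    1 ≤ d → ∀ x, (x ∈ Gdiv q d ↔ ∃ e, d ≤ e ∧ e * e ≤ q ∧ e * e ≠ q ∧ e ∣ q ∧ x = q / e) := by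
  induction d using Gdiv.induct q with
  | case1 d h hc IH =>
    intro hd x
    have IH' := IH (by omega) x
    rw [Gdiv]
    simp only [dif_pos h, if_pos hc, List.mem_cons, IH']
    rw [PySem.Int.floordiv_eq_ediv_of_pos (show (0:Int) < d by omega)]
    constructor
    · rintro (rfl | ⟨e, h1, h2, h3, h4, h5⟩)
      · exact ⟨d, le_refl _, h, hc.2, (PySem.Int.mod_eq_zero_iff_dvd q d).mp hc.1, rfl⟩
      · exact ⟨e, by omega, h2, h3, h4, h5⟩
    · rintro ⟨e, h1, h2, h3, h4, h5⟩
      rcases eq_or_lt_of_le h1 with rfl | hlt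
      · exact Or.inl h5
      · exact Or.inr ⟨e, by omega, h2, h3, h4, h5⟩
  | case2 d h hc IH =>
    intro hd x
    have IH' := IH (by omega) x
    rw [Gdiv]
    simp only [dif_pos h, if_neg hc, IH']
    constructor
    · rintro ⟨e, h1, h2, h3, h4, h5⟩; exact ⟨e, by omega, h2, h3, h4, h5⟩
    · rintro ⟨e, h1, h2, h3, h4, h5⟩
      refine ⟨e, ?_, h2, h3, h4, h5⟩
      rcases eq_or_lt_of_le h1 with rfl | hlt
      · exact absurd ⟨(PySem.Int.mod_eq_zero_iff_dvd _ _).mpr h4, h3⟩ hc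
      · omega
  | case3 d h =>
    intro hd x
    rw [Gdiv]
    simp only [dif_neg h, List.not_mem_nil, false_iff]
    rintro ⟨e, h1, h2, h3, h4, h5⟩
    have : d * d ≤ e * e := mul_le_mul h1 h1 (by omega) (by omega)
    omega

theorem pairwise_Fdiv (q d : Int) : 1 ≤ d → (Fdiv q d).Pairwise (· < ·) := by
  induction d using Fdiv.induct q with
  | case1 d h hmod IH =>
    intro hd
    rw [Fdiv]; simp only [dif_pos h, if_pos hmod]
    refine List.pairwise_cons.mpr ⟨?_, IH (by omega)⟩
    intro y hy
    have := ((mem_Fdiv q (d+1) (by omega) y).mp hy).1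
    omega
  | case2 d h hmod IH =>
    intro hd
    rw [Fdiv]; simp only [dif_pos h, if_neg hmod]
    exact IH (by omega)
  | case3 d h =>
    intro hd
    rw [Fdiv]; simp only [dif_neg h]; exact List.Pairwise.nil

theorem pairwise_Gdiv (q d : Int) : 1 ≤ d → (Gdiv q d).Pairwise (· > ·) := by
  induction d using Gdiv.induct q with
  | case1 d h hc IH =>
    intro hd
    rw [Gdiv]; simp only [dif_pos h, if_pos hc]
    refine List.pairwise_cons.mpr ⟨?_, IH (by omega)⟩
    intro y hy
    obtain ⟨e, h1, h2, h3, h4, rfl⟩ := (mem_Gdiv q (d+1) (by omega) y).mp hy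
    rw [PySem.Int.floordiv_eq_ediv_of_pos (show (0:Int) < d by omega)]
    have hdq : d ∣ q := (PySem.Int.mod_eq_zero_iff_dvd q d).mp hc.1
    have hq : 1 ≤ q := by nlinarith
    have ha : q / d * d = q := Int.ediv_mul_cancel hdq
    have hb : q / e * e = q := Int.ediv_mul_cancel h4
    have hbpos : 1 ≤ q / e := by nlinarith
    show q / e < q / d
    nlinarith
  | case2 d h hc IH =>
    intro hd
    rw [Gdiv]; simp only [dif_pos h, if_neg hc]
    exact IH (by omega)
  | case3 d h =>
    intro hd
    rw [Gdiv]; simp only [dif_neg h]; exact List.Pairwise.nil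

theorem Aloop (q : Int) (n : Nat) : ∀ (res : List Int) (c : Int),
    ((List.range n).foldl
      (fun (st : List Int × Int) _ =>
        (if PySem.Int.mod q st.2 = 0 then st.1 ++ [st.2] else st.1, st.2 + 1))
      (res, c))
    = (res ++ (PySem.List.pyRange c (c + n) 1).filter (fun x => decide (PySem.Int.mod q x = 0)), c + n) := by
  induction n with
  | zero =>
    intro res c
    simp
  | succ n IH =>
    intro res c
    rw [List.range_succ, List.foldl_append, IH]
    have : c + (n + 1 : Nat) = (c + n) + 1 := by push_cast; ring
    rw [this, PySem.List.pyRange_one_succ_right (by omega : c ≤ c + n)]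
    simp only [List.foldl_cons, List.foldl_nil, List.filter_append, List.filter_cons]
    by_cases hm : PySem.Int.mod q (c + n) = 0
    · simp [hm, List.append_assoc]
    · simp [hm]

theorem A_eq_filter (q : Int) :
    split_haycorns q = (PySem.List.pyRange 1 (1 + q) 1).filter (fun x => decide (PySem.Int.mod q x = 0)) := by
  unfold split_haycorns
  rw [PySem.List.pyRange_one 0 q, List.foldl_map, Aloop]
  by_cases hq : 0 ≤ q
  · have : (1 : Int) + ((q - 0).toNat : Int) = 1 + q := by omega
    rw [this]
    simp
  · rw [PySem.List.pyRange_one_eq_nil (by omega : (1 : Int) + ((q - 0).toNat : Int) ≤ 1),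
        PySem.List.pyRange_one_eq_nil (by omega : (1 : Int) + q ≤ 1)]
    simp

theorem mem_A (q x : Int) :
    x ∈ split_haycorns q ↔ 1 ≤ x ∧ x ≤ q ∧ x ∣ q := by
  rw [A_eq_filter]
  simp only [List.mem_filter, PySem.List.mem_pyRange_one, decide_eq_true_eq,
    PySem.Int.mod_eq_zero_iff_dvd]
  exact ⟨fun ⟨⟨a, b⟩, c⟩ => ⟨a, by omega, c⟩, fun ⟨a, b, c⟩ => ⟨⟨a, by omega⟩, c⟩⟩

theorem pairwise_A (q : Int) : (split_haycorns q).Pairwise (· < ·) := by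
  rw [A_eq_filter]
  exact (PySem.List.pairwise_lt_pyRange_one 1 (1 + q)).filter _

theorem mem_alt (q x : Int) :
    x ∈ split_haycorns_alt q ↔ 1 ≤ x ∧ x ≤ q ∧ x ∣ q := by
  unfold split_haycorns_alt
  rw [altLoop_eq]
  simp only [List.nil_append, List.mem_append, List.mem_reverse]
  rw [mem_Fdiv q 1 le_rfl, mem_Gdiv q 1 le_rfl]
  constructor
  · rintro (⟨h1, h2, h3⟩ | ⟨e, h1, h2, h3, h4, rfl⟩)
    · exact ⟨h1, le_trans (by nlinarith) h2, h3⟩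
    · have hq : 1 ≤ q := by nlinarith
      have hb : q / e * e = q := Int.ediv_mul_cancel h4
      have hx1 : 1 ≤ q / e := by nlinarith
      refine ⟨hx1, Int.le_of_dvd (by omega) ⟨e, by linarith [hb]⟩, ⟨e, by linarith [hb]⟩⟩
  · rintro ⟨h1, h2, h3⟩
    by_cases hs : x * x ≤ q
    · exact Or.inl ⟨h1, hs, h3⟩
    · right
      obtain ⟨y, hy⟩ := h3
      have hq : 1 ≤ q := by omega
      have hy1 : 1 ≤ y := by nlinarith
      refine ⟨y, hy1, by nlinarith, by nlinarith, ⟨x, by linarith [hy, mul_comm x y]⟩, ?_⟩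
      rw [hy, Int.mul_ediv_cancel _ (by omega : y ≠ 0)]

theorem pairwise_alt (q : Int) : (split_haycorns_alt q).Pairwise (· < ·) := by
  unfold split_haycorns_alt
  rw [altLoop_eq]
  simp only [List.nil_append]
  rw [List.pairwise_append]
  refine ⟨pairwise_Fdiv q 1 le_rfl, ?_, ?_⟩
  · rw [List.pairwise_reverse]
    exact pairwise_Gdiv q 1 le_rfl
  · intro x hx y hy
    rw [List.mem_reverse] at hy
    obtain ⟨hx1, hx2, hx3⟩ := (mem_Fdiv q 1 le_rfl x).mp hx
    obtain ⟨e, h1, h2, h3, h4, rfl⟩ := (mem_Gdiv q 1 le_rfl y).mp hy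
    have hb : q / e * e = q := Int.ediv_mul_cancel h4
    have hq : 1 ≤ q := by nlinarith
    have hy1 : 1 ≤ q / e := by nlinarith
    have hlt : e * e < q := lt_of_le_of_ne h2 h3
    have heb : e < q / e := by
      by_contra hc
      push Not at hc
      nlinarith [mul_le_mul_of_nonneg_right hc (show (0:Int) ≤ e by omega)]
    have hyy : q < (q / e) * (q / e) := by nlinarith [mul_lt_mul_of_pos_left heb (show (0:Int) < q / e by omega)]
    nlinarith

theorem eq_of_pairwise_lt_of_mem :
    ∀ (l₁ l₂ : List Int), l₁.Pairwise (· < ·) → l₂.Pairwise (· < ·) →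
      (∀ x, x ∈ l₁ ↔ x ∈ l₂) → l₁ = l₂ := by
  intro l₁
  induction l₁ with
  | nil =>
    intro l₂ _ _ hm
    cases l₂ with
    | nil => rfl
    | cons b u => exact absurd ((hm b).mpr (List.mem_cons_self)) (List.not_mem_nil)
  | cons a t IH =>
    intro l₂ h1 h2 hm
    cases l₂ with
    | nil => exact absurd ((hm a).mp (List.mem_cons_self)) (List.not_mem_nil)
    | cons b u =>
      rw [List.pairwise_cons] at h1 h2
      have hab : a = b := by
        rcases List.mem_cons.mp ((hm a).mp List.mem_cons_self) with h | h
        · exact h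
        · have hba : b < a := h2.1 a h
          rcases List.mem_cons.mp ((hm b).mpr List.mem_cons_self) with h' | h'
          · omega
          · have : a < b := h1.1 b h'
            omega
      subst hab
      congr 1
      refine IH u h1.2 h2.2 (fun x => ⟨fun hx => ?_, fun hx => ?_⟩)
      · rcases List.mem_cons.mp ((hm x).mp (List.mem_cons_of_mem a hx)) with h | h
        · exact absurd (h ▸ h1.1 x hx) (lt_irrefl _)
        · exact h
      · rcases List.mem_cons.mp ((hm x).mpr (List.mem_cons_of_mem a hx)) with h | h
        · exact absurd (h ▸ h2.1 x hx) (lt_irrefl _)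
        · exact h

-- ===== VERDICT (by name: the statement is the Claim_ definition above) =====
theorem split_haycorns_spec : Claim_equal_split_haycorns := by
  intro q _
  unfold Spec_split_haycorns
  exact eq_of_pairwise_lt_of_mem _ _ (pairwise_A q) (pairwise_alt q)
    (fun x => (mem_A q x).trans (mem_alt q x).symm)
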